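-- pv_equiv track=rewrite | github.com/gda1335/Data_Structers | 2-data_structures/1-array/wordlist.py | word
-- ===== SOURCE A (Python) =====
-- def word(liste):
--
--     a=liste[0]
--
--     b=liste[1].split(",")
--
--
--
--     for i in range(len(a)):
--
--         k=a[:i+1]
--
--         l=a[i+1:]
--         #cok acik
--
--         if k in b and l in b :
--
--             return k +" ,"+l
--
--     return "bulunmadi"
-- ===== SOURCE B (Python) =====
-- def word(liste):
--     a = liste[0]
--     bs = set(liste[1].split(","))
--     best = None
--     for w in bs:
--         if 1 <= len(w) <= len(a) and a.startswith(w) and a[len(w):] in bs: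
--             if best is None or len(w) < len(best):
--                 best = w
--     if best is None:
--         return "bulunmadi"
--     return best + " ," + a[len(best):]
-- ===== Notes on version B (the rewrite author's own statement) =====
-- stated objective: alternative
-- what changed: Instead of scanning cut positions of liste[0] and testing both halves by linear list membership, B builds a set of the words once and iterates over the distinct words, keeping the shortest word that is a prefix of liste[0] whose complementary suffix is also in the set.
import Mathlib
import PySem

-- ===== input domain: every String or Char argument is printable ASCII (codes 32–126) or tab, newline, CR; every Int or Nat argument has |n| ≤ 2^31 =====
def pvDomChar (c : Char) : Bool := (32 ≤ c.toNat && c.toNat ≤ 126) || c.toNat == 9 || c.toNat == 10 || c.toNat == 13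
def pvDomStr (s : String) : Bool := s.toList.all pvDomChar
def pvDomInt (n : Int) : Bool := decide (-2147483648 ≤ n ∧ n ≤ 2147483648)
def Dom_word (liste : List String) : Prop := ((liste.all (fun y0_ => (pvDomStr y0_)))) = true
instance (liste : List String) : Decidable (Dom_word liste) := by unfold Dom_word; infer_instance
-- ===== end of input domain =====

-- B iterates over the distinct words (a set built once) keeping the shortest word that is a
-- prefix of liste[0] whose complementary suffix is also a word, instead of A's scan over cut
-- positions with repeated linear list-membership tests; return values only are compared.

-- ===== PORT A =====
def wordLoop (a : String) (b : List String) : List Int → String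
  | [] => "bulunmadi"
  | i :: rest =>
    let k := PySem.Str.slice a none (some (i + 1))
    let l := PySem.Str.slice a (some (i + 1)) none
    if k ∈ b ∧ l ∈ b then k ++ " ," ++ l
    else wordLoop a b rest

def word (liste : List String) : String :=
  let a := PySem.List.pyGetD liste 0 ""
  let b := (PySem.Str.split? (PySem.List.pyGetD liste 1 "") ",").getD []
  wordLoop a b (PySem.List.pyRange 0 (PySem.Str.len a) 1)

-- ===== PORT B =====
def isCand (a : String) (bs : PySem.Set String) (w : String) : Bool :=
  decide (1 ≤ PySem.Str.len w) && decide (PySem.Str.len w ≤ PySem.Str.len a) &&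
  PySem.Str.startswith a w && bs.contains (PySem.Str.slice a (some (PySem.Str.len w)) none)

def pickBest (a : String) (bs : PySem.Set String) : Option String :=
  bs.foldl (fun best w =>
    if isCand a bs w then
      match best with
      | none => some w
      | some b0 => if PySem.Str.len w < PySem.Str.len b0 then some w else some b0
    else best) none

def word_alt (liste : List String) : String :=
  let a := PySem.List.pyGetD liste 0 ""
  let bs := PySem.Set.ofList ((PySem.Str.split? (PySem.List.pyGetD liste 1 "") ",").getD [])
  match pickBest a bs with
  | none => "bulunmadi"
  | some w => w ++ " ," ++ PySem.Str.slice a (some (PySem.Str.len w)) none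

-- ===== PRECONDITION & SPEC =====
-- Pre_: the Python A raises IndexError unless liste has at least two elements.
def Pre_word (liste : List String) : Prop := 2 ≤ liste.length
instance (liste : List String) : Decidable (Pre_word liste) := by unfold Pre_word; infer_instance
def pvWitness_word : List String := (["abc", "a,bc,x"])

def Spec_word (liste : List String) (out : String) : Prop := out = word_alt liste
instance (liste : List String) (out : String) : Decidable (Spec_word liste out) := by unfold Spec_word; infer_instance

-- ===== CLAIM (what is proved, stated in full; the proofs are below) =====
def Claim_equal_word : Prop := ∀ (liste : List String), Dom_word liste → Pre_word liste → Spec_word liste (word liste)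

-- ===== LEMMAS AND PROOFS =====

-- cut position k of a is good: both halves are words
def Pgood (a : String) (b : List String) (k : Nat) : Prop :=
  PySem.Str.slice a none (some ((k : Int) + 1)) ∈ b ∧
  PySem.Str.slice a (some ((k : Int) + 1)) none ∈ b

theorem toList_slice_to (a : String) (n : Nat) :
    (PySem.Str.slice a none (some (n : Int))).toList = a.toList.take n := by
  rw [PySem.Str.toList_slice, PySem.Chars.slice_eq_listSlice, PySem.List.slice_to_natCast]

theorem wordLoop_eq_find (a : String) (b : List String) (is : List Int) :
    wordLoop a b is = match is.find? (fun i =>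
        decide (PySem.Str.slice a none (some (i + 1)) ∈ b ∧
                PySem.Str.slice a (some (i + 1)) none ∈ b)) with
      | some i => PySem.Str.slice a none (some (i + 1)) ++ " ," ++ PySem.Str.slice a (some (i + 1)) none
      | none => "bulunmadi" := by
  induction is with
  | nil => rfl
  | cons i rest ih =>
    simp only [wordLoop, List.find?]
    by_cases h : PySem.Str.slice a none (some (i + 1)) ∈ b ∧ PySem.Str.slice a (some (i + 1)) none ∈ b
    · simp [h]
    · simp [h, ih]

theorem isCand_iff (a : String) (b : List String) (w : String) :
    isCand a (PySem.Set.ofList b) w = true ↔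
      1 ≤ w.toList.length ∧ w.toList.length ≤ a.toList.length ∧ w.toList <+: a.toList ∧
      PySem.Str.slice a (some (PySem.Str.len w)) none ∈ b := by
  simp [isCand, PySem.Str.len_eq, PySem.Str.startswith_eq, PySem.Chars.startswith_iff,
    PySem.Set.mem_ofList, Nat.one_le_cast, Nat.cast_le, and_assoc]

-- a candidate word over b corresponds to a good cut position
theorem Pgood_of_isCand (a : String) (b : List String) (w : String)
    (hw : w ∈ PySem.Set.ofList b) (hc : isCand a (PySem.Set.ofList b) w = true) :
    Pgood a b (w.toList.length - 1) ∧ w.toList.length - 1 < a.toList.length := by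
  obtain ⟨h1, h2, h3, h4⟩ := (isCand_iff a b w).mp hc
  have hcast : ((w.toList.length - 1 : Nat) : Int) + 1 = (w.toList.length : Int) := by omega
  have hsl : PySem.Str.slice a none (some (w.toList.length : Int)) = w := by
    rw [← String.toList_inj, toList_slice_to]
    exact (List.prefix_iff_eq_take.mp h3).symm
  refine ⟨⟨?_, ?_⟩, by omega⟩
  · rw [hcast, hsl]; exact (PySem.Set.mem_ofList b w).mp hw
  · rw [hcast]
    have hl : PySem.Str.len w = (w.toList.length : Int) := PySem.Str.len_eq w
    rwa [hl] at h4

theorem isCand_of_Pgood (a : String) (b : List String) (k : Nat)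
    (hk : k < a.toList.length) (h : Pgood a b k) :
    (PySem.Str.slice a none (some ((k : Int) + 1))).toList.length = k + 1 ∧
    PySem.Str.slice a none (some ((k : Int) + 1)) ∈ PySem.Set.ofList b ∧
    isCand a (PySem.Set.ofList b) (PySem.Str.slice a none (some ((k : Int) + 1))) = true := by
  have hc : ((k : Int) + 1) = ((k + 1 : Nat) : Int) := by push_cast; ring
  have ht : (PySem.Str.slice a none (some ((k : Int) + 1))).toList = a.toList.take (k + 1) := by
    rw [hc, toList_slice_to]
  have hlen : (PySem.Str.slice a none (some ((k : Int) + 1))).toList.length = k + 1 := by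
    rw [ht, List.length_take]; omega
  refine ⟨hlen, (PySem.Set.mem_ofList _ _).mpr h.1, ?_⟩
  rw [isCand_iff]
  refine ⟨by omega, by omega, ?_, ?_⟩
  · rw [ht]; exact List.take_prefix _ _
  · have hl : PySem.Str.len (PySem.Str.slice a none (some ((k : Int) + 1))) = (k : Int) + 1 := by
      rw [PySem.Str.len_eq, hlen]; push_cast; ring
    rw [hl]; exact h.2

-- two candidates of equal length are the same word
theorem cand_unique (a : String) (b : List String) (w v : String)
    (hw : isCand a (PySem.Set.ofList b) w = true) (hv : isCand a (PySem.Set.ofList b) v = true)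
    (h : w.toList.length = v.toList.length) : w = v := by
  obtain ⟨_, _, hw3, _⟩ := (isCand_iff a b w).mp hw
  obtain ⟨_, _, hv3, _⟩ := (isCand_iff a b v).mp hv
  rw [← String.toList_inj, List.prefix_iff_eq_take.mp hw3, List.prefix_iff_eq_take.mp hv3, h]

theorem pickBest_inv (a : String) (bs : PySem.Set String) (l : List String) (acc : Option String) :
    (l.foldl (fun best w =>
      if isCand a bs w then
        match best with
        | none => some w
        | some b0 => if PySem.Str.len w < PySem.Str.len b0 then some w else some b0
      else best) acc = none ↔ acc = none ∧ ∀ w ∈ l, isCand a bs w = false)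
    ∧ ∀ w, l.foldl (fun best w =>
      if isCand a bs w then
        match best with
        | none => some w
        | some b0 => if PySem.Str.len w < PySem.Str.len b0 then some w else some b0
      else best) acc = some w →
        ((isCand a bs w = true ∧ w ∈ l) ∨ acc = some w) ∧
        (∀ v ∈ l, isCand a bs v = true → w.toList.length ≤ v.toList.length) ∧
        (∀ v, acc = some v → w.toList.length ≤ v.toList.length) := by
  induction l generalizing acc with
  | nil =>
    refine ⟨by simp, ?_⟩
    intro w hw
    simp only [List.foldl_nil] at hw
    refine ⟨Or.inr hw, by simp, ?_⟩
    intro v hv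
    rw [hw] at hv
    injection hv with e
    rw [e]
  | cons x l ih =>
    simp only [List.foldl_cons]
    set acc' := (if isCand a bs x then
        match acc with
        | none => some x
        | some b0 => if PySem.Str.len x < PySem.Str.len b0 then some x else some b0
      else acc) with hacc'
    have H := ih acc'
    constructor
    · rw [H.1]
      constructor
      · rintro ⟨h1, h2⟩
        by_cases hx : isCand a bs x = true
        · exfalso
          rcases acc with _ | b0 <;> simp [hacc', hx] at h1
          split at h1 <;> simp at h1
        · have hax : acc' = acc := by simp [hacc', hx]
          rw [hax] at h1
          refine ⟨h1, ?_⟩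
          intro w hw
          rcases List.mem_cons.mp hw with rfl | hw
          · exact Bool.not_eq_true _ ▸ eq_false_of_ne_true hx
          · exact h2 w hw
      · rintro ⟨h1, h2⟩
        have hx := h2 x List.mem_cons_self
        have hax : acc' = acc := by simp [hacc', hx]
        exact ⟨by rw [hax, h1], fun w hw => h2 w (List.mem_cons_of_mem _ hw)⟩
    · intro w hw
      obtain ⟨hmem, hmin, haccle⟩ := H.2 w hw
      by_cases hx : isCand a bs x = true
      · have hstep : ∃ u, acc' = some u ∧ u.toList.length ≤ x.toList.length ∧
            (u = x ∨ acc = some u) ∧ (∀ v, acc = some v → u.toList.length ≤ v.toList.length) := by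
          rcases acc with _ | b0
          · refine ⟨x, by simp [hacc', hx], le_refl _, Or.inl rfl, ?_⟩
            intro v hv; cases hv
          · by_cases hlt : PySem.Str.len x < PySem.Str.len b0
            · refine ⟨x, by
                rw [hacc', if_pos hx]
                show (if PySem.Str.len x < PySem.Str.len b0 then some x else some b0) = some x
                rw [if_pos hlt], le_refl _, Or.inl rfl, ?_⟩
              intro v hv
              injection hv with e
              subst e
              simp only [PySem.Str.len_eq] at hlt
              omega
            · refine ⟨b0, by
                rw [hacc', if_pos hx]
                show (if PySem.Str.len x < PySem.Str.len b0 then some x else some b0) = some b0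
                rw [if_neg hlt], ?_, Or.inr rfl, ?_⟩
              · simp only [PySem.Str.len_eq] at hlt; omega
              · intro v hv
                injection hv with e
                subst e
                exact le_refl _
        obtain ⟨u, hu, hule, hor, hacc_le⟩ := hstep
        refine ⟨?_, ?_, ?_⟩
        · rcases hmem with ⟨hc, hm⟩ | hac
          · exact Or.inl ⟨hc, List.mem_cons_of_mem _ hm⟩
          · rw [hu] at hac
            injection hac with e
            rcases hor with hux | hb
            · refine Or.inl ⟨?_, ?_⟩
              · rw [← e, hux]; exact hx
              · rw [← e, hux]; exact List.mem_cons_self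
            · exact Or.inr (e ▸ hb)
        · intro v hv hcv
          rcases List.mem_cons.mp hv with rfl | hv
          · exact le_trans (haccle u hu) hule
          · exact hmin v hv hcv
        · intro v hv
          exact le_trans (haccle u hu) (hacc_le v hv)
      · have hax : acc' = acc := by simp [hacc', hx]
        refine ⟨?_, ?_, ?_⟩
        · rcases hmem with ⟨hc, hm⟩ | hac
          · exact Or.inl ⟨hc, List.mem_cons_of_mem _ hm⟩
          · exact Or.inr (hax ▸ hac)
        · intro v hv hcv
          rcases List.mem_cons.mp hv with rfl | hv
          · exact absurd hcv hx
          · exact hmin v hv hcv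
        · intro v hv
          exact haccle v (hax.symm ▸ hv)

theorem main_eq (a : String) (b : List String) :
    wordLoop a b (PySem.List.pyRange 0 (PySem.Str.len a) 1) =
      match pickBest a (PySem.Set.ofList b) with
      | none => "bulunmadi"
      | some w => w ++ " ," ++ PySem.Str.slice a (some (PySem.Str.len w)) none := by
  have hn : PySem.Str.len a = ((a.toList.length : Nat) : Int) := PySem.Str.len_eq a
  rw [wordLoop_eq_find, hn, PySem.List.pyRange_zero_natCast, List.find?_map]
  have hq : ((fun i : Int =>
      decide (PySem.Str.slice a none (some (i + 1)) ∈ b ∧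
              PySem.Str.slice a (some (i + 1)) none ∈ b)) ∘ fun k : Nat => (k : Int)) =
      fun k : Nat => decide (PySem.Str.slice a none (some ((k : Int) + 1)) ∈ b ∧
        PySem.Str.slice a (some ((k : Int) + 1)) none ∈ b) := rfl
  rw [hq]
  have hinv := pickBest_inv a (PySem.Set.ofList b) (PySem.Set.ofList b) none
  rcases hfind : List.find? (fun k : Nat =>
      decide (PySem.Str.slice a none (some ((k : Int) + 1)) ∈ b ∧
        PySem.Str.slice a (some ((k : Int) + 1)) none ∈ b)) (List.range a.toList.length)
      with _ | i
  · -- no good cut position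
    have hnone : ∀ w ∈ PySem.Set.ofList b, isCand a (PySem.Set.ofList b) w = false := by
      intro w hw
      cases hb : isCand a (PySem.Set.ofList b) w
      · rfl
      · exfalso
        obtain ⟨hP, hlt⟩ := Pgood_of_isCand a b w hw hb
        have := List.find?_eq_none.mp hfind (w.toList.length - 1) (List.mem_range.mpr hlt)
        exact this (decide_eq_true hP)
    have : pickBest a (PySem.Set.ofList b) = none := by
      unfold pickBest
      exact hinv.1.mpr ⟨rfl, hnone⟩
    rw [this]
    rfl
  · -- i is the least good cut position
    obtain ⟨hqi, idx, hidx, hEq, hprev⟩ := List.find?_eq_some_iff_getElem.mp hfind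
    have hii : i = idx := by rw [← hEq, List.getElem_range]
    subst hii
    have hi : i < a.toList.length := by simpa using hidx
    have hP0 := of_decide_eq_true hqi
    have hP : Pgood a b i := hP0
    have hminP : ∀ j < i, ¬ Pgood a b j := by
      intro j hj hPj
      have h := hprev j hj
      rw [List.getElem_range, Bool.not_eq_true'] at h
      exact (of_decide_eq_false h) hPj
    obtain ⟨hu1, hu2, hu3⟩ := isCand_of_Pgood a b i hi hP
    rcases hpb : pickBest a (PySem.Set.ofList b) with _ | w
    · exfalso
      unfold pickBest at hpb
      have := (hinv.1.mp hpb).2 _ hu2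
      rw [hu3] at this
      exact Bool.true_eq_false.mp this
    · unfold pickBest at hpb
      obtain ⟨hmem, hmin, _⟩ := hinv.2 w hpb
      rcases hmem with ⟨hcw, hw⟩ | hac
      · have h1 : w.toList.length ≤ i + 1 := hu1 ▸ hmin _ hu2 hu3
        obtain ⟨hPw, _⟩ := Pgood_of_isCand a b w hw hcw
        obtain ⟨hge1, _, _, _⟩ := (isCand_iff a b w).mp hcw
        have h2 : i ≤ w.toList.length - 1 := by
          by_contra hc
          exact hminP _ (by omega) hPw
        have hwl : w.toList.length = i + 1 := by omega
        have hwu : w = PySem.Str.slice a none (some ((i : Int) + 1)) :=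
          cand_unique a b w _ hcw hu3 (by rw [hu1, hwl])
        have hlenw : PySem.Str.len w = (i : Int) + 1 := by
          rw [PySem.Str.len_eq, hwl]; push_cast; ring
        show PySem.Str.slice a none (some ((i : Int) + 1)) ++ " ," ++
            PySem.Str.slice a (some ((i : Int) + 1)) none =
          w ++ " ," ++ PySem.Str.slice a (some (PySem.Str.len w)) none
        rw [hlenw, hwu]
      · exact absurd hac (by simp)

-- ===== VERDICT (by name: the statement is the Claim_ definition above) =====
theorem word_spec : Claim_equal_word := by
  intro liste _ _
  unfold Spec_word word word_alt
  exact main_eq _ _
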